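-- pv_equiv track=rewrite | github.com/linhnt31/Python | Competitive Progamming/CodeSignal/Tourements/1_4_2019.py | maxSumSegments
-- ===== SOURCE A (Python) =====
-- def maxSumSegments(inputArray):
--     res = []
--
--     for i in range(len(inputArray)):
--         count = i + 1
--         max_ = -float('inf')
--         ind = 0
--         for j in range(len(inputArray) - count + 1):
--             if max_ < sum(inputArray[j : j + count]):
--                 max_ = sum(inputArray[j : j + count])
--                 ind = j
--         res.append(ind)
--
--     return res
-- ===== SOURCE B (Python) =====
-- def maxSumSegments(inputArray):
--     n = len(inputArray)
--     pre = [0]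
--     s = 0
--     for x in inputArray:
--         s += x
--         pre.append(s)
--     res = []
--     for count in range(1, n + 1):
--         best = pre[count] - pre[0]
--         best_j = 0
--         for j in range(1, n - count + 1):
--             cur = pre[j + count] - pre[j]
--             if cur > best:
--                 best = cur
--                 best_j = j
--         res.append(best_j)
--     return res
-- ===== Notes on version B (the rewrite author's own statement) =====
-- stated objective: faster
-- what changed: Replaced the per-window slice summation (computed twice per comparison) by a prefix-sum array giving each window sum in O(1), keeping the first strict maximum per length.
import Mathlib
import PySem

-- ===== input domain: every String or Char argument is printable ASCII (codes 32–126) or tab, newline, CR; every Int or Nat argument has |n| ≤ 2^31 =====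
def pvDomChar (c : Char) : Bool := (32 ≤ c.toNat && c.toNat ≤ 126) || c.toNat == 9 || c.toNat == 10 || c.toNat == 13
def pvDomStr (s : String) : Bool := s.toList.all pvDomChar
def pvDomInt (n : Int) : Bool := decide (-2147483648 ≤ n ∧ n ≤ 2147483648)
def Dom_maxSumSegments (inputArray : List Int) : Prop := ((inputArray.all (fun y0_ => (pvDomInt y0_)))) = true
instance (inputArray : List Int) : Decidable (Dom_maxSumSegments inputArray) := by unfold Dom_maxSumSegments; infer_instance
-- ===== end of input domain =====

-- B replaces A's O(n^3) repeated slice summation by an O(n^2) prefix-sum scan (same first-max tie-breaking).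

-- ===== PORT A =====
-- max_ starts at -float('inf'); since all compared values are ints, it is modelled exactly
-- as Option Int with none = -infinity (none compares below every int).
def maxSumSegments (inputArray : List Int) : List Int :=
  (List.range inputArray.length).foldl (fun res i =>
    let count := i + 1
    let st := (List.range (inputArray.length - count + 1)).foldl
      (fun (s : Option Int × Int) (j : Nat) =>
        match s.1 with
        | none => ((PySem.List.slice inputArray (some (j : Int)) (some ((j : Int) + (count : Int)))).sum, (j : Int))
        | some m =>
          if m < (PySem.List.slice inputArray (some (j : Int)) (some ((j : Int) + (count : Int)))).sum then
            ((PySem.List.slice inputArray (some (j : Int)) (some ((j : Int) + (count : Int)))).sum, (j : Int))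
          else s)
      (none, 0)
    res ++ [st.2]) []

-- ===== PORT B =====
def maxSumSegments_alt (inputArray : List Int) : List Int :=
  let n := inputArray.length
  -- pre = [0]; s = 0; for x in inputArray: s += x; pre.append(s)
  let pre := (inputArray.foldl (fun (ps : List Int × Int) x => (ps.1 ++ [ps.2 + x], ps.2 + x)) ([0], 0)).1
  -- indices into pre are always in range (comment: getD is exact for these in-range nonneg indices)
  (List.range' 1 n).foldl (fun res count =>
    let st := (List.range' 1 (n - count)).foldl
      (fun (bs : Int × Int) (j : Nat) =>
        let cur := pre.getD (j + count) 0 - pre.getD j 0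
        if cur > bs.1 then (cur, (j : Int)) else bs)
      (pre.getD count 0 - pre.getD 0 0, 0)
    res ++ [st.2]) []

-- ===== PRECONDITION & SPEC =====
def Spec_maxSumSegments (inputArray : List Int) (out : List Int) : Prop := out = maxSumSegments_alt inputArray
instance (inputArray : List Int) (out : List Int) : Decidable (Spec_maxSumSegments inputArray out) := by unfold Spec_maxSumSegments; infer_instance

-- ===== CLAIM (what is proved, stated in full; the proofs are below) =====
def Claim_equal_maxSumSegments : Prop := ∀ (inputArray : List Int), Dom_maxSumSegments inputArray → Spec_maxSumSegments inputArray (maxSumSegments inputArray)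

-- ===== LEMMAS AND PROOFS =====

-- partial sums of xs starting from accumulator s (the list B's first loop appends)
def presums : List Int → Int → List Int
  | [], _ => []
  | x :: xs, s => (s + x) :: presums xs (s + x)

theorem presums_fold (xs : List Int) : ∀ (l : List Int) (s : Int),
    (xs.foldl (fun (ps : List Int × Int) x => (ps.1 ++ [ps.2 + x], ps.2 + x)) (l, s)) = (l ++ presums xs s, s + xs.sum) := by
  induction xs with
  | nil => intro l s; simp [presums]
  | cons x xs ih => intro l s; simp [presums, List.foldl_cons, ih]; ring

theorem presums_getD (xs : List Int) : ∀ (k : Nat) (s : Int), k < xs.length →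
    (presums xs s).getD k 0 = s + (xs.take (k + 1)).sum := by
  induction xs with
  | nil => intro k s h; simp at h
  | cons x xs ih =>
    intro k s h
    cases k with
    | zero => simp [presums]
    | succ k =>
      simp only [presums, List.getD_cons_succ, List.take_succ_cons, List.sum_cons]
      rw [ih k (s + x) (by simpa using h)]; ring

theorem pre_getD (xs : List Int) (k : Nat) (hk : k ≤ xs.length) :
    ((0 : Int) :: presums xs 0).getD k 0 = (xs.take k).sum := by
  cases k with
  | zero => simp
  | succ k => simp only [List.getD_cons_succ]; rw [presums_getD xs k 0 (by omega)]; simp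

-- window sum via prefix sums
theorem window_sum (xs : List Int) (j c : Nat) :
    ((xs.drop j).take c).sum = (xs.take (j + c)).sum - (xs.take j).sum := by
  rw [List.take_add]; simp

-- the two inner folds agree when their window-value functions agree on the index list
theorem inner_fold_eq (vA vB : Nat → Int) : ∀ (l : List Nat) (m ind : Int),
    (∀ j ∈ l, vA j = vB j) →
    l.foldl (fun (s : Option Int × Int) (j : Nat) =>
        match s.1 with
        | none => (some (vA j), (j : Int))
        | some m' => if m' < vA j then (some (vA j), (j : Int)) else s) (some m, ind)
      = (some (l.foldl (fun (bs : Int × Int) j => if vB j > bs.1 then (vB j, (j : Int)) else bs) (m, ind)).1,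
         (l.foldl (fun (bs : Int × Int) j => if vB j > bs.1 then (vB j, (j : Int)) else bs) (m, ind)).2) := by
  intro l
  induction l with
  | nil => intro m ind _; simp
  | cons j l ih =>
    intro m ind h
    simp only [List.foldl_cons]
    rw [h j (by simp)]
    by_cases hc : m < vB j
    · simp only [gt_iff_lt, hc]
      exact ih (vB j) (j : Int) (fun a ha => h a (by simp [ha]))
    · simp only [gt_iff_lt, hc]
      exact ih m ind (fun a ha => h a (by simp [ha]))

theorem inner_eq (vA vB : Nat → Int) (m : Nat) (h : ∀ j, j ≤ m → vA j = vB j) :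
    ((List.range (m + 1)).foldl (fun (s : Option Int × Int) (j : Nat) =>
        match s.1 with
        | none => (some (vA j), (j : Int))
        | some m' => if m' < vA j then (some (vA j), (j : Int)) else s) (none, 0)).2
      = ((List.range' 1 m).foldl (fun (bs : Int × Int) j => if vB j > bs.1 then (vB j, (j : Int)) else bs) (vB 0, 0)).2 := by
  have hr : List.range (m + 1) = 0 :: List.range' 1 m := by
    simp [List.range_succ_eq_map, List.range'_eq_map_range]
    exact fun a _ => by omega
  rw [hr, List.foldl_cons]
  have h0 : vA 0 = vB 0 := h 0 (Nat.zero_le m)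
  simp only [Nat.cast_zero, h0]
  rw [inner_fold_eq vA vB (List.range' 1 m) (vB 0) 0
      (fun j hj => h j (by have := List.mem_range'_1.mp hj; omega))]

-- pointwise-equal fold steps give equal folds
theorem foldl_congr_append {α : Type} (f g : Nat → α) : ∀ (l : List Nat) (acc : List α),
    (∀ i ∈ l, f i = g i) →
    l.foldl (fun res i => res ++ [f i]) acc = l.foldl (fun res i => res ++ [g i]) acc := by
  intro l
  induction l with
  | nil => intro acc _; rfl
  | cons i l ih =>
    intro acc h
    simp only [List.foldl_cons, h i (by simp)]
    exact ih _ (fun a ha => h a (by simp [ha]))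

-- ===== VERDICT (by name: the statement is the Claim_ definition above) =====
theorem maxSumSegments_spec : Claim_equal_maxSumSegments := by
  intro xs _
  unfold Spec_maxSumSegments
  simp only [maxSumSegments, maxSumSegments_alt, presums_fold,
    List.range'_eq_map_range (s := 1), List.foldl_map]
  apply Eq.symm
  apply foldl_congr_append
  intro i hi
  have hin : i < xs.length := List.mem_range.mp hi
  have hcount : 1 + i = i + 1 := by omega
  simp only [hcount]
  have hpre : ∀ k, k ≤ xs.length → (((0:Int) :: presums xs 0).getD k 0) = (xs.take k).sum :=
    fun k hk => pre_getD xs k hk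
  have key := inner_eq
    (fun j => (PySem.List.slice xs (some (j : Int)) (some ((j : Int) + ((i + 1 : Nat) : Int)))).sum)
    (fun j => ((0:Int) :: presums xs 0).getD (j + (i + 1)) 0 - ((0:Int) :: presums xs 0).getD j 0)
    (xs.length - (i + 1))
    (by
      intro j hj
      simp only
      rw [PySem.List.slice_natCast_add, window_sum, hpre (j + (i + 1)) (by omega), hpre j (by omega)])
  rw [List.range'_eq_map_range, List.foldl_map] at key
  simp only [Nat.zero_add] at key
  exact key.symm
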